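-- pv_equiv track=rewrite | github.com/carlhannes/boom | ai_agent/core/learner.py | _group_related_actions
-- ===== SOURCE A (Python) =====
-- from typing import List, Dict, Any, Optional, Set
--
-- def _group_related_actions(actions: List[Dict[str, Any]]) -> List[List[Dict[str, Any]]]:
--     """Group related actions together based on type and target"""
--     if not actions:
--         return []
--
--     groups = []
--     current_group = [actions[0]]
--
--     for action in actions[1:]:
--         prev_action = current_group[-1]
--
--         # Check if actions are related
--         if (action.get('type', '').split('_')[0] == prev_action.get('type', '').split('_')[0] or
--             action.get('file') == prev_action.get('file')):
--             current_group.append(action)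
--         else:
--             groups.append(current_group)
--             current_group = [action]
--
--     groups.append(current_group)
--     return groups
-- ===== SOURCE B (Python) =====
-- def _group_related_actions(actions):
--     """Group related actions: two phases — find break positions, then slice."""
--     if not actions:
--         return []
--     cuts = [0]
--     i = 1
--     for prev, cur in zip(actions, actions[1:]):
--         if (cur.get('type', '').split('_')[0] != prev.get('type', '').split('_')[0]
--                 and cur.get('file') != prev.get('file')):
--             cuts.append(i)
--         i += 1
--     cuts.append(len(actions))
--     return [actions[a:b] for a, b in zip(cuts, cuts[1:])]
-- ===== Notes on version B (the rewrite author's own statement) =====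
-- stated objective: alternative
-- what changed: B replaces A's single accumulator loop (finished groups + growing current group) by two staged passes: first collect the boundary indices where adjacent actions are unrelated, then slice the list at those boundaries to form the groups.
import Mathlib
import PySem

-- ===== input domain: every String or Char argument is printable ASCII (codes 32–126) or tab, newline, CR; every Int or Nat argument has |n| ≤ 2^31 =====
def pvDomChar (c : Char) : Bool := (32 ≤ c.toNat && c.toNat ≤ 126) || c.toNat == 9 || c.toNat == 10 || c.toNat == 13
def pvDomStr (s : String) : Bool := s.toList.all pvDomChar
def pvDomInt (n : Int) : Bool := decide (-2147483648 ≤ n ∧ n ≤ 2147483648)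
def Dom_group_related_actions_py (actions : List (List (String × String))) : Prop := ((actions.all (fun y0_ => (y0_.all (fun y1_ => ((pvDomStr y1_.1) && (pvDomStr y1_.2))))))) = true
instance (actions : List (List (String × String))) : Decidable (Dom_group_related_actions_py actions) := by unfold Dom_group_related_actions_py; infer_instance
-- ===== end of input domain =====

-- B groups by two staged passes (collect break indices, then slice the list at them)
-- instead of A's one accumulator loop; objective: alternative decomposition, same cost.

-- action.get('type','').split('_')[0]  (shared subexpression of both Pythons)
def pvTypeHead (x : List (String × String)) : String :=
  (((PySem.Str.split? (PySem.Dict.getD (PySem.Dict.mk x) "type" "") "_").getD []).headD "")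

-- ===== PORT A =====
-- A's relatedness test: type-prefixes equal OR 'file' values equal
def pvRel (x y : List (String × String)) : Bool :=
  (pvTypeHead x == pvTypeHead y) ||
  ((PySem.Dict.get? (PySem.Dict.mk x) "file") == (PySem.Dict.get? (PySem.Dict.mk y) "file"))

-- loop body of A's for-loop: state = (groups, current_group); prev = current_group[-1]
def pvStepA (st : List (List (List (String × String))) × List (List (String × String)))
    (action : List (String × String)) :
    List (List (List (String × String))) × List (List (String × String)) :=
  let prev := st.2.getLast?.getD []
  if pvRel action prev then (st.1, st.2 ++ [action])
  else (st.1 ++ [st.2], [action])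

def group_related_actions_py (actions : List (List (String × String))) : List (List (List (String × String))) :=
  match actions with
  | [] => []
  | a0 :: rest =>
    let fin := rest.foldl pvStepA ([], [a0])
    fin.1 ++ [fin.2]

-- ===== PORT B =====
-- B's break test between adjacent actions: type-prefixes differ AND 'file' values differ
def pvBreak (prev cur : List (String × String)) : Bool :=
  (pvTypeHead cur != pvTypeHead prev) &&
  ((PySem.Dict.get? (PySem.Dict.mk cur) "file") != (PySem.Dict.get? (PySem.Dict.mk prev) "file"))

-- pass 1: fold over zip(actions, actions[1:]) with the 1-based counter i, collecting cut indices
-- (cut indices are nonnegative Python ints; Nat with ↑-cast into the slice is exact here)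
def group_related_actions_py_alt (actions : List (List (String × String))) : List (List (List (String × String))) :=
  match actions with
  | [] => []
  | _ :: _ =>
    let st := (List.zip actions actions.tail).foldl
      (fun (st : List Nat × Nat) pc =>
        (if pvBreak pc.1 pc.2 then st.1 ++ [st.2] else st.1, st.2 + 1)) ([], 1)
    let cuts := 0 :: st.1 ++ [actions.length]
    -- pass 2: actions[a:b] for adjacent cut pairs
    (List.zip cuts cuts.tail).map
      (fun ab => PySem.List.slice actions (some (ab.1 : Int)) (some (ab.2 : Int)))

-- ===== PRECONDITION & SPEC =====
def Spec_group_related_actions_py (actions : List (List (String × String))) (out : List (List (List (String × String)))) : Prop := out = group_related_actions_py_alt actions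
instance (actions : List (List (String × String))) (out : List (List (List (String × String)))) : Decidable (Spec_group_related_actions_py actions out) := by unfold Spec_group_related_actions_py; infer_instance

-- ===== CLAIM (what is proved, stated in full; the proofs are below) =====
def Claim_equal_group_related_actions_py : Prop := ∀ (actions : List (List (String × String))), Dom_group_related_actions_py actions → Spec_group_related_actions_py actions (group_related_actions_py actions)

-- ===== LEMMAS AND PROOFS =====

-- both programs reduce to the canonical back-to-front grouping step below
def pvStepB (action : List (String × String))
    (groups : List (List (List (String × String)))) : List (List (List (String × String))) :=
  match groups with
  | [] => [[action]]
  | g :: gs => if pvRel action (g.headD []) then (action :: g) :: gs else [action] :: g :: gs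

theorem pvBeqComm {α : Type} [BEq α] [LawfulBEq α] (a b : α) : (a == b) = (b == a) := by
  by_cases h : a = b
  · subst h; rfl
  · simp [h, Ne.symm h]

theorem pvRel_comm (x y : List (String × String)) : pvRel x y = pvRel y x := by
  unfold pvRel
  rw [pvBeqComm, @pvBeqComm (Option String)]

theorem pvBreak_eq_not_rel (p c : List (String × String)) : pvBreak p c = !(pvRel c p) := by
  simp [pvBreak, pvRel, bne]

-- the finished-groups component of A's state only ever grows at the front
theorem foldlA_factor (l : List (List (String × String)))
    (gs : List (List (List (String × String)))) (cur : List (List (String × String))) :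
    (l.foldl pvStepA (gs, cur)).1 = gs ++ (l.foldl pvStepA ([], cur)).1 ∧
    (l.foldl pvStepA (gs, cur)).2 = (l.foldl pvStepA ([], cur)).2 := by
  induction l generalizing gs cur with
  | nil => simp
  | cons x l ih =>
    simp only [List.foldl_cons, pvStepA]
    split
    · exact ih gs (cur ++ [x])
    · obtain ⟨h1, h2⟩ := ih (gs ++ [cur]) [x]
      obtain ⟨h1', h2'⟩ := ih [cur] [x]
      simp only [List.nil_append]
      exact ⟨by rw [h1, h1', List.append_assoc], by rw [h2, h2']⟩

-- canonical grouping of a nonempty list: the first group starts with the first action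
theorem foldrB_shape (x : List (String × String)) (l : List (List (String × String))) :
    ∃ t gs, (x :: l).foldr pvStepB [] = (x :: t) :: gs := by
  simp only [List.foldr_cons]
  cases l.foldr pvStepB [] with
  | nil => exact ⟨[], [], rfl⟩
  | cons g gs =>
    simp only [pvStepB]
    split
    · exact ⟨g, gs, rfl⟩
    · exact ⟨[], g :: gs, rfl⟩

-- invariant linking A's accumulator run to the canonical grouping
theorem main_inv (l : List (List (String × String))) (c : List (String × String))
    (cur : List (List (String × String))) :
    (l.foldl pvStepA ([], cur ++ [c])).1 ++ [(l.foldl pvStepA ([], cur ++ [c])).2] =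
      (cur ++ ((c :: l).foldr pvStepB []).headD []) :: ((c :: l).foldr pvStepB []).tail := by
  induction l generalizing c cur with
  | nil => simp [pvStepB]
  | cons x l ih =>
    obtain ⟨t, gs, hB⟩ := foldrB_shape x l
    simp only [List.foldl_cons, pvStepA, List.getLast?_concat, Option.getD_some]
    by_cases hrel : pvRel x c = true
    · simp only [hrel, if_true]
      rw [ih x (cur ++ [c])]
      simp only [List.foldr_cons, hB, pvStepB, pvRel_comm c x, hrel, if_true, List.headD_cons,
        List.tail_cons]
      simp [List.append_assoc]
    · simp only [hrel, Bool.false_eq_true, if_false, List.nil_append]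
      have hfac := foldlA_factor l [cur ++ [c]] [x]
      rw [hfac.1, hfac.2]
      have hx := ih x []
      simp only [List.nil_append] at hx
      rw [List.append_assoc, hx]
      simp only [List.foldr_cons, hB, pvStepB, pvRel_comm c x, hrel, List.headD_cons,
        List.tail_cons]
      simp

-- A equals the canonical grouping
theorem portA_eq_canon (actions : List (List (String × String))) :
    group_related_actions_py actions = actions.foldr pvStepB [] := by
  unfold group_related_actions_py
  match actions with
  | [] => rfl
  | a :: rest =>
    show (rest.foldl pvStepA ([], [a])).1 ++ [(rest.foldl pvStepA ([], [a])).2] =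
      (a :: rest).foldr pvStepB []
    obtain ⟨t, gs, hB⟩ := foldrB_shape a rest
    have h := main_inv rest a []
    simp only [List.nil_append, hB, List.headD_cons, List.tail_cons] at h
    rw [hB]
    exact h

-- ===== B-side: the break positions B's first pass collects, as a pure function =====
def pvG (ps : List (List (String × String) × List (String × String))) (c : Nat) : List Nat :=
  match ps with
  | [] => []
  | p :: t => (if pvBreak p.1 p.2 then [c] else []) ++ pvG t (c + 1)

theorem foldlB_eq_pvG (ps : List (List (String × String) × List (String × String)))
    (acc : List Nat) (c : Nat) :
    ps.foldl (fun (st : List Nat × Nat) pc =>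
        (if pvBreak pc.1 pc.2 then st.1 ++ [st.2] else st.1, st.2 + 1)) (acc, c) =
      (acc ++ pvG ps c, c + ps.length) := by
  induction ps generalizing acc c with
  | nil => simp [pvG]
  | cons p t ih =>
    simp only [List.foldl_cons, pvG]
    split
    · rw [ih]; simp; omega
    · rw [ih]; simp; omega

theorem pvG_shift (ps : List (List (String × String) × List (String × String))) (c : Nat) :
    pvG ps (c + 1) = (pvG ps c).map (· + 1) := by
  induction ps generalizing c with
  | nil => rfl
  | cons p t ih => simp only [pvG, List.map_append]; rw [ih]; split <;> simp

-- slices of l at adjacent pairs of a cut list (what B's second pass computes)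
def pvSlices (l : List (List (String × String))) (cuts : List Nat) :
    List (List (List (String × String))) :=
  (List.zip cuts cuts.tail).map (fun ab => (l.drop ab.1).take (ab.2 - ab.1))

theorem pvSlices_shift (a : List (String × String)) (l : List (List (String × String)))
    (cs : List Nat) : pvSlices (a :: l) (cs.map (· + 1)) = pvSlices l cs := by
  unfold pvSlices
  rw [← List.map_tail, List.zip_map, List.map_map]
  apply List.map_congr_left
  intro ab _
  simp [Nat.add_sub_add_right]

-- B's port unfolds to pvSlices at the cut list
theorem portB_eq_slices (a : List (String × String)) (rest : List (List (String × String))) :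
    group_related_actions_py_alt (a :: rest) =
      pvSlices (a :: rest) (0 :: pvG (List.zip (a :: rest) rest) 1 ++ [rest.length + 1]) := by
  unfold group_related_actions_py_alt pvSlices
  simp only [List.tail_cons, List.length_cons]
  rw [foldlB_eq_pvG]
  simp only [List.nil_append]
  apply List.map_congr_left
  intro ab _
  rw [PySem.List.slice_natCast]

-- the canonical grouping equals pvSlices at the cut list
theorem canon_eq_slices (a : List (String × String)) (rest : List (List (String × String))) :
    pvSlices (a :: rest) (0 :: pvG (List.zip (a :: rest) rest) 1 ++ [rest.length + 1]) =
      (a :: rest).foldr pvStepB [] := by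
  induction rest generalizing a with
  | nil => simp [pvSlices, pvG, pvStepB, List.zip]
  | cons b t ih =>
    obtain ⟨tg, gs, hB⟩ := foldrB_shape b t
    have hzip : List.zip (a :: b :: t) (b :: t) = (a, b) :: List.zip (b :: t) t := rfl
    have hexp : pvG (List.zip (a :: b :: t) (b :: t)) 1 =
        (if pvBreak a b then [1] else []) ++ (pvG (List.zip (b :: t) t) 1).map (· + 1) := by
      rw [hzip]
      show (if pvBreak a b then [1] else []) ++ pvG (List.zip (b :: t) t) (1 + 1) = _
      exact congrArg (fun z => (if pvBreak a b then [1] else []) ++ z)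
        (pvG_shift (List.zip (b :: t) t) 1)
    have hgoalR : List.foldr pvStepB [] (a :: b :: t) = pvStepB a ((b :: tg) :: gs) := by
      rw [← hB]; rfl
    rw [hexp, hgoalR]
    have hih := ih b
    rw [hB] at hih
    by_cases hbr : pvBreak a b = true
    · -- a is unrelated to b: cut at position 1, the first group is [a]
      simp only [hbr, if_true]
      have hcuts : (0 : Nat) :: ([1] ++ (pvG (List.zip (b :: t) t) 1).map (· + 1)) ++
          [(b :: t).length + 1] =
          0 :: (((0 : Nat) :: pvG (List.zip (b :: t) t) 1 ++ [t.length + 1]).map (· + 1)) := by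
        simp [List.map_append]
      rw [List.cons_append] at hcuts ⊢
      rw [hcuts]
      have hstep : pvSlices (a :: b :: t)
          (0 :: (((0 : Nat) :: pvG (List.zip (b :: t) t) 1 ++ [t.length + 1]).map (· + 1))) =
          [a] :: pvSlices (b :: t) ((0 : Nat) :: pvG (List.zip (b :: t) t) 1 ++ [t.length + 1]) := by
        rw [← pvSlices_shift a (b :: t)]
        unfold pvSlices
        simp
      rw [hstep, hih]
      have hr : pvRel a b = false := by
        rw [pvRel_comm]
        rw [pvBreak_eq_not_rel] at hbr
        simpa using hbr
      simp [pvStepB, hr]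
    · -- a is related to b: a joins b's group
      simp only [hbr, Bool.false_eq_true, if_false, List.nil_append]
      have hr : pvRel a b = true := by
        rw [pvBreak_eq_not_rel] at hbr
        rw [pvRel_comm]
        simpa using hbr
      rcases hcz : pvG (List.zip (b :: t) t) 1 ++ [t.length + 1] with _ | ⟨c1, ct⟩
      · exact absurd hcz (by simp)
      · -- split hih into its first group and the rest
        rw [List.cons_append, hcz] at hih
        have hih' : (b :: t).take c1 :: pvSlices (b :: t) (c1 :: ct) = (b :: tg) :: gs := by
          rw [← hih]
          unfold pvSlices
          simp
        have h1 : (b :: t).take c1 = b :: tg := ((List.cons.injEq _ _ _ _).mp hih').1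
        have h2 : pvSlices (b :: t) (c1 :: ct) = gs := ((List.cons.injEq _ _ _ _).mp hih').2
        have hcuts : (0 : Nat) :: (pvG (List.zip (b :: t) t) 1).map (· + 1) ++
            [(b :: t).length + 1] = 0 :: ((c1 :: ct).map (· + 1)) := by
          have hmm : ((pvG (List.zip (b :: t) t) 1) ++ [t.length + 1]).map (· + 1) =
              (c1 :: ct).map (· + 1) := by rw [hcz]
          simp only [List.map_append] at hmm
          simp only [List.cons_append, List.length_cons]
          rw [← hmm]
          simp
        rw [List.cons_append] at hcuts ⊢
        rw [hcuts]
        have hsplit : pvSlices (a :: b :: t) (0 :: ((c1 :: ct).map (· + 1))) =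
            ((a :: b :: t).take (c1 + 1)) :: pvSlices (b :: t) (c1 :: ct) := by
          conv_lhs => rw [show ((c1 :: ct).map (· + 1)) = (c1 + 1) :: ct.map (· + 1) from rfl]
          unfold pvSlices
          simp only [List.tail_cons, List.zip_cons_cons, List.map_cons, List.drop_zero,
            Nat.sub_zero]
          congr 1
          have hs := pvSlices_shift a (b :: t) (c1 :: ct)
          unfold pvSlices at hs
          simpa using hs
        rw [hsplit, h2]
        have htake : (a :: b :: t).take (c1 + 1) = a :: (b :: tg) := by
          simp [List.take_succ_cons, h1]
        rw [htake]
        simp [pvStepB, hr]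

-- ===== VERDICT (by name: the statement is the Claim_ definition above) =====
theorem group_related_actions_py_spec : Claim_equal_group_related_actions_py := by
  intro actions _
  unfold Spec_group_related_actions_py
  rw [portA_eq_canon]
  match actions with
  | [] => rfl
  | a :: rest => rw [portB_eq_slices, canon_eq_slices]
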